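-- pv_equiv track=rewrite | github.com/Chajmer/advent_of_code | aoc_24/02/aoc_24_02_1.py | check
-- ===== SOURCE A (Python) =====
-- def check(line):
--     report = [int(x) for x in line.split()]
--     if report[0] > report[-1]:
--         report = report[::-1]
--
--     prev = report[0]
--     for i in range(1, len(report)):
--         if prev > report[i] or not (0 < abs(prev - report[i]) < 4):
--             return False
--         prev = report[i]
--     return True
-- ===== SOURCE B (Python) =====
-- def check(line):
--     report = [int(x) for x in line.split()]
--     diffs = [report[i + 1] - report[i] for i in range(len(report) - 1)]
--     return all(1 <= d <= 3 for d in diffs) or all(-3 <= d <= -1 for d in diffs)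
-- ===== Notes on version B (the rewrite author's own statement) =====
-- stated objective: alternative
-- what changed: Replaces A's reverse-then-monotonic-scan (with early return) by building the list of consecutive differences once and testing it uniformly against the two direction ranges; Pre_ excludes empty/whitespace lines and lines with non-integer tokens, on which A raises.
import Mathlib
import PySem

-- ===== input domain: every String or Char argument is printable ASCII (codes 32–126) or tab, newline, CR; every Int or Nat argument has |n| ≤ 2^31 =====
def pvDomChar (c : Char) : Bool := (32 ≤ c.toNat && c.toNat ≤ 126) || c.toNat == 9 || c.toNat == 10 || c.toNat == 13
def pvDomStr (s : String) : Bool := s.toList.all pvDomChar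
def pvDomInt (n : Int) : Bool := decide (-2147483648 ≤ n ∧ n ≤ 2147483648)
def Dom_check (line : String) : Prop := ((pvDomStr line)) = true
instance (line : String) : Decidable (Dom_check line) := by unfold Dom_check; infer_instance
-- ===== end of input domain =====

-- B replaces A's reverse-then-monotonic-scan by one pass over the consecutive-difference list,
-- tested against the two direction ranges (alternative decomposition, same cost).

-- ===== PORT A =====
-- the 'for i in range(1, len(report))' loop with its early 'return False'
def checkLoopA (report : List Int) (prev : Int) : List Int → Bool
  | [] => true
  | i :: rest =>
      let ri := PySem.List.pyGetD report i 0
      if prev > ri || !(decide (0 < (prev - ri).natAbs) && decide ((prev - ri).natAbs < 4)) then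
        false
      else
        checkLoopA report ri rest

def check (line : String) : Bool :=
  match (PySem.Str.split₀ line).mapM PySem.Int.ofStr? with
  | none => false  -- int(x) raises ValueError: excluded by Pre_check
  | some report0 =>
    -- report[0] > report[-1]; report[0] on [] raises IndexError: excluded by Pre_check
    let report :=
      if PySem.List.pyGetD report0 0 0 > PySem.List.pyGetD report0 (-1) 0 then
        (PySem.List.slice? report0 none none (-1)).getD []   -- report[::-1]
      else report0
    let prev := PySem.List.pyGetD report 0 0
    checkLoopA report prev (PySem.List.pyRange 1 (report.length : Int) 1)

-- ===== PORT B =====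
def check_alt (line : String) : Bool :=
  match (PySem.Str.split₀ line).mapM PySem.Int.ofStr? with
  | none => false  -- int(x) raises ValueError: excluded by Pre_check
  | some report =>
    let diffs := (PySem.List.pyRange 0 ((report.length : Int) - 1) 1).map
        (fun i => PySem.List.pyGetD report (i + 1) 0 - PySem.List.pyGetD report i 0)
    diffs.all (fun d => decide (1 ≤ d) && decide (d ≤ 3)) ||
      diffs.all (fun d => decide (-3 ≤ d) && decide (d ≤ -1))

-- ===== PRECONDITION & SPEC =====
-- Pre_ excludes exactly the inputs where Python A raises: an empty/whitespace line (IndexError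
-- on report[0]) and lines with a token int() rejects (ValueError).
def Pre_check (line : String) : Prop :=
  PySem.Str.split₀ line ≠ [] ∧ ∀ t ∈ PySem.Str.split₀ line, (PySem.Int.ofStr? t).isSome
instance (line : String) : Decidable (Pre_check line) := by unfold Pre_check; infer_instance

def pvWitness_check : String := "1 2 3"

def Spec_check (line : String) (out : Bool) : Prop := out = check_alt line
instance (line : String) (out : Bool) : Decidable (Spec_check line out) := by unfold Spec_check; infer_instance

-- ===== CLAIM (what is proved, stated in full; the proofs are below) =====
def Claim_equal_check : Prop := ∀ (line : String), Dom_check line → Pre_check line → Spec_check line (check line)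

-- ===== LEMMAS AND PROOFS =====

-- the step relations of the two scans
abbrev IncR (a b : Int) : Prop := 1 ≤ b - a ∧ b - a ≤ 3
abbrev DecR (a b : Int) : Prop := -3 ≤ b - a ∧ b - a ≤ -1

-- the consecutive-difference list, structurally
def chDiffs : List Int → List Int
  | a :: b :: r => (b - a) :: chDiffs (b :: r)
  | _ => []

-- A's step test is exactly the negation of IncR
theorem condA_eq (prev x : Int) :
    (decide (prev > x) || !(decide (0 < (prev - x).natAbs) && decide ((prev - x).natAbs < 4)))
      = !decide (IncR prev x) := by
  unfold IncR
  by_cases h : 1 ≤ x - prev ∧ x - prev ≤ 3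
  · have h1 : ¬ prev > x := by omega
    have h2 : 0 < (prev - x).natAbs := by omega
    have h3 : (prev - x).natAbs < 4 := by omega
    simp [h1, h2, h3, h]
  · by_cases hgt : prev > x
    · simp [hgt]
      omega
    · have h4 : ¬ (0 < (prev - x).natAbs ∧ (prev - x).natAbs < 4) := by omega
      simp only [h, hgt, decide_false, Bool.false_or, Bool.not_false, Bool.not_eq_true']
      simp only [Bool.and_eq_false_iff, decide_eq_false_iff_not]
      omega

theorem checkLoopA_eq_chain (l : List Int) :
    ∀ (k : Nat) (prev : Int), k ≤ l.length →
      checkLoopA l prev (PySem.List.pyRange (k : Int) (l.length : Int) 1) =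
        decide (List.IsChain IncR (prev :: l.drop k)) := by
  intro k
  induction hn : l.length - k generalizing k with
  | zero =>
      intro prev hk
      have hkl : k = l.length := by omega
      subst hkl
      rw [PySem.List.pyRange_one_eq_nil (by omega)]
      simp [checkLoopA, List.drop_length, List.IsChain.singleton]
  | succ n ih =>
      intro prev hk
      have hklt : k < l.length := by omega
      rw [PySem.List.pyRange_one_cons (by exact_mod_cast hklt)]
      have hdrop : l.drop k = l[k] :: l.drop (k + 1) := List.drop_eq_getElem_cons hklt
      have hget : PySem.List.pyGetD l (k : Int) 0 = l[k] := PySem.List.pyGetD_ofNat _ _ _ hklt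
      simp only [checkLoopA, hget, condA_eq]
      by_cases hinc : IncR prev l[k]
      · rw [if_neg (by simp [hinc])]
        have hcast : ((k : Int) + 1) = ((k + 1 : Nat) : Int) := by push_cast; ring
        rw [hcast, ih (k + 1) (by omega) l[k] (by omega), hdrop, decide_eq_decide,
          List.isChain_cons_cons]
        exact (and_iff_right hinc).symm
      · rw [if_pos (by simp [hinc])]
        have hni : ¬ List.IsChain IncR (prev :: l.drop k) := by
          rw [hdrop]
          intro h
          exact hinc (List.isChain_cons_cons.mp h).1
        simp [hni]

theorem chDiffs_all (p : Int → Bool) (l : List Int) :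
    (chDiffs l).all p = decide (List.IsChain (fun a b => p (b - a) = true) l) := by
  induction l with
  | nil => simp [chDiffs]
  | cons a r ih =>
      cases r with
      | nil => simp [chDiffs, List.IsChain.singleton]
      | cons b r' =>
          simp only [chDiffs, List.all_cons, ih]
          by_cases h : p (b - a) = true <;> simp [List.isChain_cons_cons, h]

theorem diffs_eq_chDiffs (l : List Int) :
    ∀ (k : Nat), k ≤ l.length →
      (PySem.List.pyRange (k : Int) ((l.length : Int) - 1) 1).map
          (fun i => PySem.List.pyGetD l (i + 1) 0 - PySem.List.pyGetD l i 0) =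
        chDiffs (l.drop k) := by
  intro k
  induction hn : l.length - k generalizing k with
  | zero =>
      intro hk
      have hkl : k = l.length := by omega
      subst hkl
      rw [PySem.List.pyRange_one_eq_nil (by omega), List.drop_length]
      simp [chDiffs]
  | succ n ih =>
      intro hk
      have hklt : k < l.length := by omega
      by_cases hlast : k + 1 = l.length
      · -- last element: range (k, len-1) is empty and drop k is a singleton
        rw [PySem.List.pyRange_one_eq_nil (by omega)]
        have hdrop : l.drop k = l[k] :: l.drop (k + 1) := List.drop_eq_getElem_cons hklt
        rw [hdrop, List.drop_eq_nil_of_le (by omega)]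
        simp [chDiffs]
      · have hk1 : k + 1 < l.length := by omega
        rw [PySem.List.pyRange_one_cons (by omega)]
        have hdropk : l.drop k = l[k] :: l.drop (k + 1) := List.drop_eq_getElem_cons hklt
        have hdropk1 : l.drop (k + 1) = l[k + 1] :: l.drop (k + 2) := List.drop_eq_getElem_cons hk1
        have hcast : ((k : Int) + 1) = ((k + 1 : Nat) : Int) := by push_cast; ring
        rw [List.map_cons, hcast, ih (k + 1) (by omega) (by omega),
          PySem.List.pyGetD_ofNat _ _ _ hk1, PySem.List.pyGetD_ofNat _ _ _ hklt,
          hdropk, hdropk1]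
        simp [chDiffs]

-- B's boolean, expressed through IsChain
theorem check_alt_chain (report : List Int) :
    (((PySem.List.pyRange 0 ((report.length : Int) - 1) 1).map
        (fun i => PySem.List.pyGetD report (i + 1) 0 - PySem.List.pyGetD report i 0)).all
        (fun d => decide (1 ≤ d) && decide (d ≤ 3)) ||
      ((PySem.List.pyRange 0 ((report.length : Int) - 1) 1).map
        (fun i => PySem.List.pyGetD report (i + 1) 0 - PySem.List.pyGetD report i 0)).all
        (fun d => decide (-3 ≤ d) && decide (d ≤ -1))) =
      (decide (List.IsChain IncR report) || decide (List.IsChain DecR report)) := by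
  have hd := diffs_eq_chDiffs report 0 (by omega)
  simp only [Nat.cast_zero, List.drop_zero] at hd
  rw [hd, chDiffs_all, chDiffs_all]
  have e1 : decide (List.IsChain (fun a b => (decide (1 ≤ b - a) && decide (b - a ≤ 3)) = true) report)
      = decide (List.IsChain IncR report) := decide_eq_decide.mpr
    ⟨fun h => h.imp (by intro a b hab; unfold IncR; simp at hab; omega),
     fun h => h.imp (by intro a b hab; unfold IncR at hab; simp; omega)⟩
  have e2 : decide (List.IsChain (fun a b => (decide (-3 ≤ b - a) && decide (b - a ≤ -1)) = true) report)
      = decide (List.IsChain DecR report) := decide_eq_decide.mpr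
    ⟨fun h => h.imp (by intro a b hab; unfold DecR; simp at hab; omega),
     fun h => h.imp (by intro a b hab; unfold DecR at hab; simp; omega)⟩
  rw [e1, e2]

theorem chain_inc_reverse (l : List Int) :
    List.IsChain IncR l.reverse ↔ List.IsChain DecR l := by
  rw [List.isChain_reverse]
  constructor
  · intro h; exact h.imp (by intro a b hab; unfold IncR at hab; unfold DecR; omega)
  · intro h; exact h.imp (by intro a b hab; unfold DecR at hab; unfold IncR; omega)

theorem chain_inc_head_lt_last (a : Int) (rest : List Int) (h : List.IsChain IncR (a :: rest))
    (hne : rest ≠ []) : a < (a :: rest).getLast (by simp) := by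
  have hlt : List.IsChain (· < ·) (a :: rest) :=
    h.imp (by intro x y hxy; unfold IncR at hxy; omega)
  rw [List.getLast_cons hne]
  exact hlt.rel_cons (List.getLast_mem hne)

theorem chain_dec_head_gt_last (a : Int) (rest : List Int) (h : List.IsChain DecR (a :: rest))
    (hne : rest ≠ []) : (a :: rest).getLast (by simp) < a := by
  have hlt : List.IsChain (· > ·) (a :: rest) :=
    h.imp (by intro x y hxy; unfold DecR at hxy; omega)
  rw [List.getLast_cons hne]
  exact hlt.rel_cons (List.getLast_mem hne)

-- A's value on a parsed report, expressed through IsChain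
theorem check_list_chain (report : List Int) :
    (let rep :=
      if PySem.List.pyGetD report 0 0 > PySem.List.pyGetD report (-1) 0 then
        (PySem.List.slice? report none none (-1)).getD []
      else report
     checkLoopA rep (PySem.List.pyGetD rep 0 0) (PySem.List.pyRange 1 (rep.length : Int) 1)) =
      (decide (List.IsChain IncR report) || decide (List.IsChain DecR report)) := by
  have key : ∀ (l : List Int),
      checkLoopA l (PySem.List.pyGetD l 0 0) (PySem.List.pyRange 1 (l.length : Int) 1) =
        decide (List.IsChain IncR l) := by
    intro l
    cases l with
    | nil =>
        rw [PySem.List.pyRange_one_eq_nil (by simp)]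
        simp [checkLoopA]
    | cons a r =>
        have hc := checkLoopA_eq_chain (a :: r) 1 (PySem.List.pyGetD (a :: r) 0 0) (by simp)
        simp only [Nat.cast_one] at hc
        rw [hc]
        simp [PySem.List.pyGetD_zero_cons]
  cases report with
  | nil => decide
  | cons a r =>
      simp only [PySem.List.slice?_none_none_neg_one, Option.getD_some]
      by_cases hne : r = []
      · subst hne
        have hm1 : PySem.List.pyGetD [a] (-1) (0 : Int) = a := by
          rw [PySem.List.pyGetD_neg_one _ 0 (by simp)]
          simp
        rw [hm1, PySem.List.pyGetD_zero_cons, if_neg (by omega)]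
        rw [PySem.List.pyGetD_zero_cons, PySem.List.pyRange_one_eq_nil (by norm_num)]
        simp [checkLoopA, List.IsChain.singleton]
      · have hlast : PySem.List.pyGetD (a :: r) (-1) 0 = (a :: r).getLast (by simp) :=
          PySem.List.pyGetD_neg_one _ 0 (by simp)
        rw [hlast]
        by_cases hgt : (a :: r).getLast (by simp) < a
        · rw [if_pos]
          · have e3 : decide (List.IsChain IncR (a :: r).reverse)
                = decide (List.IsChain DecR (a :: r)) :=
              decide_eq_decide.mpr (chain_inc_reverse (a :: r))
            rw [key, e3]
            have hni : ¬ List.IsChain IncR (a :: r) := fun h =>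
              absurd (chain_inc_head_lt_last a r h hne) (by omega)
            simp [hni]
          · simpa [PySem.List.pyGetD_zero_cons] using hgt
        · rw [if_neg]
          · rw [key]
            by_cases hdec : List.IsChain DecR (a :: r)
            · exact absurd (chain_dec_head_gt_last a r hdec hne) hgt
            · simp [hdec]
          · simpa [PySem.List.pyGetD_zero_cons] using hgt

-- ===== VERDICT (by name: the statement is the Claim_ definition above) =====
theorem check_spec : Claim_equal_check := by
  intro line _hdom _hpre
  unfold Spec_check check check_alt
  cases hm : (PySem.Str.split₀ line).mapM PySem.Int.ofStr? with
  | none => rfl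
  | some report =>
      simp only []
      rw [check_list_chain report, check_alt_chain report]
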